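-- pv_equiv track=rewrite | github.com/rorro6787/NND | neuro_disease_detector/nnu_net/utils.py | _get_patient_by_test_id
-- ===== SOURCE A (Python) =====
-- timepoints_patient = [3,4,4,3,2,3,
--                       2,2,3,2,2,4,2,
--                       4,1,1,1,1,4,3,1,1,
--                       2,1,1,1,1,2,1,0,2,1,2,1,1,1,
--                       1,1,1,1,1,1,1,2,2,2,2,1,1,
--                       1,1,1,2]
--
-- def _get_patient_by_test_id(test_id: int | str):
--     """
--     Given a test ID and a list with the number of tests per patient,
--     return the patient to which the test belongs.
--
--     Args:
--         test_id (int | str): The ID of the test.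
--
--     Returns:
--         str: The patient to which the test belongs.
--     """
--
--     test_id = int(test_id)
--     current_id = 0
--
--     for i, num_tests in enumerate(timepoints_patient):
--         current_id += num_tests
--         if test_id <= current_id:
--             return f"P{i + 1}"
--
--     return "ID not found"
-- ===== SOURCE B (Python) =====
-- from bisect import bisect_left
-- from itertools import accumulate
--
-- timepoints_patient = [3,4,4,3,2,3,
--                       2,2,3,2,2,4,2,
--                       4,1,1,1,1,4,3,1,1,
--                       2,1,1,1,1,2,1,0,2,1,2,1,1,1,
--                       1,1,1,1,1,1,1,2,2,2,2,1,1,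
--                       1,1,1,2]
--
-- _PREFIX = list(accumulate(timepoints_patient))
--
-- def _get_patient_by_test_id(test_id: int | str):
--     """Prefix-sum table + binary search instead of a linear cumulative scan."""
--     test_id = int(test_id)
--     idx = bisect_left(_PREFIX, test_id)
--     if idx == len(_PREFIX):
--         return "ID not found"
--     return f"P{idx + 1}"
-- ===== Notes on version B (the rewrite author's own statement) =====
-- stated objective: idiomatic
-- what changed: Replaced the linear accumulate-and-compare scan with a prefix-sum table built once via itertools.accumulate plus bisect_left binary search.
import Mathlib
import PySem

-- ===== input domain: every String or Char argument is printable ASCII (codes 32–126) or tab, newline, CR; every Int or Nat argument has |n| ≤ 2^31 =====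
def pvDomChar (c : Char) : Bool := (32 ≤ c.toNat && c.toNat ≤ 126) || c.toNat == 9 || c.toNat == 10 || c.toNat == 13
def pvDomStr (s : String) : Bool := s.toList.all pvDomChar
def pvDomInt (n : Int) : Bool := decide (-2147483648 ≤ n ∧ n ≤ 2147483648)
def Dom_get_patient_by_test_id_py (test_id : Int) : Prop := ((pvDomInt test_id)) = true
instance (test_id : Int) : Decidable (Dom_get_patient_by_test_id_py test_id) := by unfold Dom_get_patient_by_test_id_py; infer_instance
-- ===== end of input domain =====

-- B replaces A's linear cumulative scan with a prefix-sum table built once plus bisect_left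
-- (binary search); more idiomatic, same return value for every int input.


-- ===== PORT A =====
-- timepoints_patient (module-level constant)
def timepointsPatient : List Int :=
  [3,4,4,3,2,3,
   2,2,3,2,2,4,2,
   4,1,1,1,1,4,3,1,1,
   2,1,1,1,1,2,1,0,2,1,2,1,1,1,
   1,1,1,1,1,1,1,2,2,2,2,1,1,
   1,1,1,2]

-- the 'for i, num_tests in enumerate(...)' loop with early return, state = (current_id, i)
def getPatientLoop (test_id current_id i : Int) : List Int → String
  | [] => "ID not found"
  | num_tests :: rest =>
    let current_id' := current_id + num_tests
    if test_id ≤ current_id' then "P" ++ PySem.Int.toStr (i + 1)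
    else getPatientLoop test_id current_id' (i + 1) rest

def get_patient_by_test_id_py (test_id : Int) : String :=
  getPatientLoop test_id 0 0 timepointsPatient

-- ===== PORT B =====
-- port of itertools.accumulate (running sums, exact)
def pyAccumulate (cur : Int) : List Int → List Int
  | [] => []
  | n :: rest => (cur + n) :: pyAccumulate (cur + n) rest

-- _PREFIX = list(accumulate(timepoints_patient))
def prefixTable : List Int := pyAccumulate 0 timepointsPatient

def get_patient_by_test_id_py_alt (test_id : Int) : String :=
  let idx := PySem.List.bisectLeft prefixTable test_id
  if idx = prefixTable.length then "ID not found"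
  else "P" ++ PySem.Int.toStr ((idx : Int) + 1)

-- ===== PRECONDITION & SPEC =====
def Spec_get_patient_by_test_id_py (test_id : Int) (out : String) : Prop := out = get_patient_by_test_id_py_alt test_id
instance (test_id : Int) (out : String) : Decidable (Spec_get_patient_by_test_id_py test_id out) := by unfold Spec_get_patient_by_test_id_py; infer_instance

-- ===== CLAIM (what is proved, stated in full; the proofs are below) =====
def Claim_equal_get_patient_by_test_id_py : Prop := ∀ (test_id : Int), Dom_get_patient_by_test_id_py test_id → Spec_get_patient_by_test_id_py test_id (get_patient_by_test_id_py test_id)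

-- ===== LEMMAS AND PROOFS =====

theorem length_pyAccumulate (cur : Int) (l : List Int) :
    (pyAccumulate cur l).length = l.length := by
  induction l generalizing cur with
  | nil => rfl
  | cons n rest ih => simp [pyAccumulate, ih]

-- A's scan, characterised by any index k bracketing test_id in the running prefix sums
theorem getPatientLoop_char (t cur i : Int) (l : List Int) (k : Nat)
    (hk : k ≤ l.length)
    (hlt : ∀ j (hj : j < (pyAccumulate cur l).length), j < k → (pyAccumulate cur l)[j] < t)
    (hge : ∀ j (hj : j < (pyAccumulate cur l).length), k ≤ j → t ≤ (pyAccumulate cur l)[j]) :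
    getPatientLoop t cur i l =
      if k = l.length then "ID not found" else "P" ++ PySem.Int.toStr (i + k + 1) := by
  induction l generalizing cur i k with
  | nil =>
    have hk0 : k = 0 := by simpa using hk
    subst hk0
    simp [getPatientLoop]
  | cons n rest ih =>
    simp only [pyAccumulate] at hlt hge
    cases k with
    | zero =>
      have h0 : t ≤ cur + n := by
        have := hge 0 (by simp) (Nat.zero_le _); simpa using this
      simp [getPatientLoop, h0]
    | succ k' =>
      have h0 : cur + n < t := by
        have := hlt 0 (by simp) (Nat.succ_pos _); simpa using this
      have hnot : ¬ t ≤ cur + n := by omega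
      have hrec := ih (cur + n) (i + 1) k'
        (by have := hk; simp at this; omega)
        (fun j hj hjk => by
          have := hlt (j + 1) (by simpa using Nat.succ_lt_succ hj) (Nat.succ_lt_succ hjk)
          simpa using this)
        (fun j hj hjk => by
          have := hge (j + 1) (by simpa using Nat.succ_lt_succ hj) (Nat.succ_le_succ hjk)
          simpa using this)
      simp only [getPatientLoop, if_neg hnot, hrec]
      rw [show i + 1 + (k' : Int) + 1 = i + ((k' + 1 : Nat) : Int) + 1 by push_cast; ring]
      by_cases hke : k' = rest.length
      · simp [hke]
      · have hne : k' + 1 ≠ rest.length + 1 := by omega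
        simp only [List.length_cons, if_neg hke, if_neg hne]

theorem prefixTable_sorted : List.Pairwise (fun x1 x2 => x1 ≤ x2) prefixTable := by decide

theorem get_patient_by_test_id_py_spec_aux (t : Int) :
    get_patient_by_test_id_py t = get_patient_by_test_id_py_alt t := by
  have hspec := PySem.List.bisectLeft_spec prefixTable t prefixTable_sorted
  obtain ⟨hle, hlt, hge⟩ := hspec
  have hlen : prefixTable.length = timepointsPatient.length := length_pyAccumulate 0 _
  have h := getPatientLoop_char t 0 0 timepointsPatient (PySem.List.bisectLeft prefixTable t)
    (by omega) (fun j hj hjk => hlt j (by exact hj) hjk) (fun j hj hjk => hge j (by exact hj) hjk)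
  simp only [get_patient_by_test_id_py, get_patient_by_test_id_py_alt, h, hlen, zero_add]

-- ===== VERDICT (by name: the statement is the Claim_ definition above) =====
theorem get_patient_by_test_id_py_spec : Claim_equal_get_patient_by_test_id_py := by
  intro t _
  unfold Spec_get_patient_by_test_id_py
  exact get_patient_by_test_id_py_spec_aux t
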